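-- pv_equiv track=rewrite | github.com/bartzlot/simple_txt_compression | text.py | encode
-- ===== SOURCE A (Python) =====
-- def encode(key: str, text: str):
--
--     encoded_text = ''
--     last_shift = sum([ord(key[i % len(key)]) for i in range(len(text))])
--
--     for i, letter in enumerate(text):
--
--         shift = ord(key[i % len(key)]) + last_shift % 95
--         encoded_letter = chr(((ord(letter) - 32 + shift) % 95) + 32)
--
--         while encoded_letter == '\n':
--             shift += 1
--             encoded_letter = chr(((ord(letter) - 32 + shift) % 95) + 32)
--
--         encoded_text += encoded_letter
--         last_shift = shift
--
--     return encoded_text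
--
-- str = (encode('k', 'aaaaaaaaaaaaaaaaaaaaaaaaaaaaaaaaaaaaaaaaaaaaaaaaaaaaaaaaaaaaaaaaaaaaaaaaaaaaaaaaaaaaaaaaaaaaaaaaaaaaaaaaaaaaaaaaaaaaaaaaaaaaaaaaaaaaaaaaaaaaaaaaaaaaaaaaaaaaaaaaaaaaaaaaaaaaaaaaaaaaaaaaaaaaaaaaaaaaaaaaaaaaaaaaaaaaaaaaaaaaaaaaaaaaaaaaaaaaaaaaaaaaaaaaaaaaaaaaaaaaaaaaaaaaaaaa'))
-- ===== SOURCE B (Python) =====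
-- def encode(key: str, text: str):
--     # closed-form offsets from a key-sized prefix-sum table (no running accumulator over text)
--     n = len(text)
--     if n == 0:
--         return ''
--     L = len(key)
--     prefix = [0]
--     for ch in key:
--         prefix.append(prefix[-1] + ord(ch))
--     K = prefix[-1]
--     S = (n // L) * K + prefix[n % L]
--     out = []
--     for i in range(n):
--         off = (S + ((i + 1) // L) * K + prefix[(i + 1) % L]) % 95
--         out.append(chr((ord(text[i]) - 32 + off) % 95 + 32))
--     return ''.join(out)
-- ===== Notes on version B (the rewrite author's own statement) =====
-- stated objective: alternative
-- what changed: A's stateful per-character shift recurrence (with a dead while loop on '\n') is replaced by a closed form: a key-sized prefix-sum table is built once, and each position's offset is computed independently as (S + (i+1)//L*K + prefix[(i+1)%L]) mod 95, eliminating the running accumulator over the text entirely.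
import Mathlib
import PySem

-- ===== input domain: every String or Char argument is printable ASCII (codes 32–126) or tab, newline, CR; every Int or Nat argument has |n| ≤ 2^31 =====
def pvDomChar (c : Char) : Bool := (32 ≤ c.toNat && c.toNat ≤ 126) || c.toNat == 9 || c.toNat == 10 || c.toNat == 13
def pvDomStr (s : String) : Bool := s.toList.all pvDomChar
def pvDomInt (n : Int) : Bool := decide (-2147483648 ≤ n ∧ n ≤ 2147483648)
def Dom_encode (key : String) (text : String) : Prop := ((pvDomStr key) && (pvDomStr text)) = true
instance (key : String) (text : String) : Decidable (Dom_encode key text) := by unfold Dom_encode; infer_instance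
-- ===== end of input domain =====

-- B replaces A's stateful per-character shift recurrence by a closed form: a key-sized
-- prefix-sum table plus an arithmetic formula gives each position's offset independently
-- (objective: alternative algorithm, same cost).

-- ===== PORT A =====
-- ord(key[i % len(key)]) — under Pre_encode (key nonempty whenever text is) the index
-- i % len(key) is always in range, so the ' ' default of getD is never used; exact there.
def keyAt (key : String) (i : Nat) : Int :=
  ((key.toList.getD (i % key.toList.length) ' ').toNat : Int)

-- chr(((ord(letter) - 32 + shift) % 95) + 32) — literally in both Pythons
def encChar (c : Char) (shift : Int) : Char :=
  Char.ofNat (PySem.Int.mod ((c.toNat : Int) - 32 + shift) 95 + 32).toNat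

-- the for-loop of A: state = (encoded_text, i, last_shift)
def encodeGo (key : String) (acc : List Char) (i : Nat) (lastShift : Int) :
    List Char → List Char
  | [] => acc
  | c :: rest =>
    let shift := keyAt key i + PySem.Int.mod lastShift 95
    let e := encChar c shift
    -- Python's `while encoded_letter == '\n'` body, unrolled once: the produced char always
    -- lies in [32,126] (never 10), so the condition is False and the body never runs (proved
    -- below in encChar_ne_newline); exact.
    let se := if e = '\n' then (shift + 1, encChar c (shift + 1)) else (shift, e)
    encodeGo key (acc ++ [se.2]) (i + 1) se.1 rest

def encode (key : String) (text : String) : String :=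
  let lastShift := ((List.range text.toList.length).map (fun i => keyAt key i)).sum
  String.mk (encodeGo key [] 0 lastShift text.toList)

-- ===== PORT B =====
-- the prefix table: prefix = [0]; for ch in key: prefix.append(prefix[-1] + ord(ch))
def prefTable (ks : List Char) : List Int :=
  ks.foldl (fun p ch => p ++ [p.getLast?.getD 0 + ((ch.toNat : Int))]) [0]

-- index arithmetic (i+1)//L, (i+1)%L uses Nat division/mod: both operands are nonnegative,
-- where Python's // and % agree with Nat's; exact.
def encode_alt (key : String) (text : String) : String :=
  let n := text.toList.length
  if n = 0 then "" else
    let L := key.toList.length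
    let pre := prefTable key.toList
    let K := pre.getLast?.getD 0
    let S := ((n / L : Nat) : Int) * K + pre.getD (n % L) 0
    String.mk ((List.range n).map (fun i =>
      let off := PySem.Int.mod (S + (((i + 1) / L : Nat) : Int) * K + pre.getD ((i + 1) % L) 0) 95
      encChar (text.toList.getD i ' ') off))

-- ===== PRECONDITION & SPEC =====
-- Pre_ excludes only the inputs where A raises: empty key with nonempty text (ZeroDivisionError
-- from i % len(key)); B raises there too.
def Pre_encode (key : String) (text : String) : Prop := key ≠ "" ∨ text = ""
instance (key : String) (text : String) : Decidable (Pre_encode key text) := by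
  unfold Pre_encode; infer_instance

def pvWitness_encode : String × String := ("k", "ab")

def Spec_encode (key : String) (text : String) (out : String) : Prop := out = encode_alt key text
instance (key : String) (text : String) (out : String) : Decidable (Spec_encode key text out) := by
  unfold Spec_encode; infer_instance

-- ===== CLAIM =====
def Claim_equal_encode : Prop := ∀ (key : String) (text : String), Dom_encode key text → Pre_encode key text → Spec_encode key text (encode key text)

-- ===== LEMMAS AND PROOFS =====

-- Σ_{j<m} keyAt key (i+j)
def sumSeg (key : String) (i m : Nat) : Int :=
  ((List.range m).map (fun j => keyAt key (i + j))).sum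

-- Σ over the first r key characters
def psum (ks : List Char) (r : Nat) : Int :=
  ((ks.take r).map (fun c => ((c.toNat : Int)))).sum

lemma mod95_eq_emod (a : Int) : PySem.Int.mod a 95 = a % 95 :=
  PySem.Int.mod_eq_emod_of_pos (by norm_num)

lemma encChar_congr (c : Char) {a b : Int}
    (h : a % 95 = b % 95) : encChar c a = encChar c b := by
  unfold encChar
  simp only [mod95_eq_emod]
  congr 2
  omega

lemma encChar_ne_newline (c : Char) (s : Int) : encChar c s ≠ '\n' := by
  unfold encChar
  intro h
  have h1 : 0 ≤ ((c.toNat : Int) - 32 + s) % 95 := Int.emod_nonneg _ (by norm_num)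
  have h2 : ((c.toNat : Int) - 32 + s) % 95 < 95 := Int.emod_lt_of_pos _ (by norm_num)
  rw [mod95_eq_emod] at h
  have hv := congrArg Char.toNat h
  rw [Char.toNat_ofNat] at hv
  have hval : (((c.toNat : Int) - 32 + s) % 95 + 32).toNat.isValidChar := by
    constructor; omega
  rw [if_pos hval] at hv
  simp only [show ('\n').toNat = 10 from rfl] at hv
  omega

-- A's loop produces encChar of the running offset; characterised positionally
lemma encodeGo_eq_map (key : String) : ∀ (cs : List Char) (acc : List Char) (i : Nat) (s : Int),
    encodeGo key acc i s cs
      = acc ++ (List.range cs.length).map (fun t =>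
          encChar (cs.getD t ' ') (PySem.Int.mod (s + sumSeg key i (t + 1)) 95)) := by
  intro cs
  induction cs with
  | nil => intro acc i s; simp [encodeGo]
  | cons c rest ih =>
    intro acc i s
    rw [encodeGo]
    simp only [if_neg (encChar_ne_newline c _)]
    rw [ih]
    rw [List.length_cons, List.range_succ_eq_map, List.map_cons, List.map_map,
      List.append_assoc]
    congr 1
    have hhead : encChar c (keyAt key i + PySem.Int.mod s 95)
        = encChar c (PySem.Int.mod (s + sumSeg key i 1) 95) := by
      apply encChar_congr
      simp only [mod95_eq_emod, sumSeg, List.range_one, List.map_cons, List.map_nil,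
        List.sum_cons, List.sum_nil, Nat.add_zero, Int.add_zero]
      omega
    rw [hhead]
    rw [List.singleton_append]
    congr 1
    apply List.map_congr_left
    intro t _
    simp only [Function.comp_def, List.getD_cons_succ]
    apply encChar_congr
    have hseg : sumSeg key i (t + 1 + 1) = keyAt key i + sumSeg key (i + 1) (t + 1) := by
      simp only [sumSeg]
      rw [List.range_succ_eq_map, List.map_cons, List.map_map, List.sum_cons]
      congr 1
      apply congrArg
      apply List.map_congr_left
      intro j _
      simp only [Function.comp_def]
      congr 1
      omega
    rw [hseg]
    simp only [mod95_eq_emod]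
    omega

-- the scan produced by the prefix-table fold
def scanFrom (a : Int) : List Char → List Int
  | [] => []
  | c :: cs => (a + (c.toNat : Int)) :: scanFrom (a + (c.toNat : Int)) cs

lemma prefTable_fold (ks : List Char) : ∀ (pre : List Int) (a : Int),
    ks.foldl (fun p ch => p ++ [p.getLast?.getD 0 + ((ch.toNat : Int))]) (pre ++ [a])
      = pre ++ a :: scanFrom a ks := by
  induction ks with
  | nil => intro pre a; simp [scanFrom]
  | cons c cs ih =>
    intro pre a
    rw [List.foldl_cons]
    have hlast : ((pre ++ [a]).getLast?.getD 0) = a := by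
      rw [List.getLast?_append]; rfl
    rw [hlast]
    have : pre ++ [a] ++ [a + (c.toNat : Int)] = (pre ++ [a]) ++ [a + (c.toNat : Int)] := rfl
    rw [this, ih (pre ++ [a]) (a + (c.toNat : Int))]
    simp [scanFrom]

lemma prefTable_eq (ks : List Char) : prefTable ks = 0 :: scanFrom 0 ks := by
  have := prefTable_fold ks [] 0
  simpa [prefTable] using this

lemma psum_succ (ks : List Char) (r : Nat) (hr : r < ks.length) :
    psum ks (r + 1) = psum ks r + ((ks.getD r ' ').toNat : Int) := by
  simp only [psum, List.map_take]
  rw [List.sum_take_succ _ r (by simpa using hr)]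
  congr 1
  · simp [List.getD, List.getElem?_eq_getElem hr]

lemma scanFrom_getD (ks : List Char) : ∀ (a : Int) (r : Nat), r < ks.length →
    (scanFrom a ks).getD r 0 = a + psum ks (r + 1) := by
  induction ks with
  | nil => intro a r h; simp at h
  | cons c cs ih =>
    intro a r h
    cases r with
    | zero =>
      simp [scanFrom, psum]
    | succ r =>
      simp only [scanFrom, List.getD_cons_succ]
      rw [ih (a + (c.toNat : Int)) r (by simpa using h)]
      have : psum (c :: cs) (r + 2) = (c.toNat : Int) + psum cs (r + 1) := by
        simp [psum]
      rw [this]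
      ring

lemma prefTable_getD (ks : List Char) (r : Nat) (hr : r ≤ ks.length) :
    (prefTable ks).getD r 0 = psum ks r := by
  rw [prefTable_eq]
  cases r with
  | zero => simp [psum]
  | succ r =>
    simp only [List.getD_cons_succ]
    rw [scanFrom_getD ks 0 r (by omega)]
    ring

lemma scanFrom_last (ks : List Char) : ∀ (a : Int),
    ((a :: scanFrom a ks).getLast?.getD 0) = a + psum ks ks.length := by
  induction ks with
  | nil => intro a; simp [scanFrom, psum]
  | cons c cs ih =>
    intro a
    simp only [scanFrom]
    rw [List.getLast?_cons_cons]
    rw [ih (a + (c.toNat : Int))]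
    have : psum (c :: cs) (cs.length + 1) = (c.toNat : Int) + psum cs cs.length := by
      simp [psum]
    rw [List.length_cons, this]
    ring

lemma prefTable_last (ks : List Char) :
    ((prefTable ks).getLast?.getD 0) = psum ks ks.length := by
  rw [prefTable_eq]
  have := scanFrom_last ks 0
  rw [this]; ring

-- the closed form: for positive key length, q*K + prefix[m % L] = Σ_{j<m} keyAt key j
lemma closed_form (key : String) (hL : 0 < key.toList.length) (m : Nat) :
    ((m / key.toList.length : Nat) : Int) * psum key.toList key.toList.length
      + psum key.toList (m % key.toList.length) = sumSeg key 0 m := by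
  induction m with
  | zero =>
    simp [psum, sumSeg, Nat.zero_div, Nat.zero_mod]
  | succ m ih =>
    set L := key.toList.length with hLdef
    have hr : m % L < L := Nat.mod_lt _ hL
    have hsucc : sumSeg key 0 (m + 1) = sumSeg key 0 m + keyAt key m := by
      simp only [sumSeg]
      rw [List.range_succ, List.map_append, List.sum_append]
      simp
    have hkey : keyAt key m = ((key.toList.getD (m % L) ' ').toNat : Int) := rfl
    have hm := Nat.div_add_mod m L
    by_cases hcase : m % L + 1 < L
    · have hdiv : (m + 1) / L = m / L := by
        have : m + 1 = (m % L + 1) + L * (m / L) := by omega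
        rw [this, Nat.add_mul_div_left _ _ hL, Nat.div_eq_of_lt hcase]
        omega
      have hmod : (m + 1) % L = m % L + 1 := by
        have : m + 1 = (m % L + 1) + L * (m / L) := by omega
        rw [this, Nat.add_mul_mod_self_left, Nat.mod_eq_of_lt hcase]
      rw [hdiv, hmod, hsucc, ← ih, psum_succ _ _ hr, hkey]
      ring
    · have heq : m % L + 1 = L := by omega
      have hstep : m + 1 = L * (m / L + 1) := by
        rw [Nat.mul_add, Nat.mul_one]; omega
      have hdiv : (m + 1) / L = m / L + 1 := by
        rw [hstep, Nat.mul_div_cancel_left _ hL]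
      have hmod : (m + 1) % L = 0 := by
        rw [hstep, Nat.mul_mod_right]
      have hK := psum_succ key.toList (m % L) hr
      rw [heq] at hK
      rw [hdiv, hmod, hsucc, ← ih, hK, hkey]
      push_cast
      simp [psum]
      ring

-- ===== VERDICT =====
theorem encode_spec : Claim_equal_encode := by
  intro key text _ hpre
  unfold Spec_encode encode encode_alt
  simp only []
  by_cases hn : text.toList.length = 0
  · rw [if_pos hn]
    have htl : text.toList = [] := List.eq_nil_of_length_eq_zero hn
    rw [htl]
    show String.mk [] = ""
    rfl
  · rw [if_neg hn]
    have hL : 0 < key.toList.length := by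
      rcases hpre with hk | ht
      · rcases Nat.eq_zero_or_pos key.toList.length with h0 | h
        · exact absurd (String.toList_eq_nil_iff.mp (List.eq_nil_of_length_eq_zero h0)) hk
        · exact h
      · rw [ht] at hn; exact absurd (by decide) hn
    rw [encodeGo_eq_map, List.nil_append]
    congr 1
    apply List.map_congr_left
    intro t ht
    rw [List.mem_range] at ht
    apply encChar_congr
    have hK := prefTable_last key.toList
    have hS := prefTable_getD key.toList (text.toList.length % key.toList.length)
      (le_of_lt (Nat.mod_lt _ hL))
    have hT := prefTable_getD key.toList ((t + 1) % key.toList.length)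
      (le_of_lt (Nat.mod_lt _ hL))
    rw [hK, hS, hT]
    have hsum : ((List.range text.toList.length).map (fun i => keyAt key i)).sum
        = sumSeg key 0 text.toList.length := by
      simp [sumSeg]
    rw [hsum]
    have hcf1 := closed_form key hL text.toList.length
    have hcf2 := closed_form key hL (t + 1)
    simp only [mod95_eq_emod]
    rw [← hcf1, ← hcf2]
    ring_nf
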